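-- pv_equiv track=rewrite | github.com/alina1909/MunteanAlinaCristina_InfoIII_LimbajeFormale | lab6/ex1/ex1.py | pump_lemma_check_L3
-- ===== SOURCE A (Python) =====
-- def pump_lemma_check_L3(n):
--     # L3={a^n b^n c^n | n>0}
--     w = "a" * n + "b" * n + "c" * n
--     for i in range(1, n + 1):
--         x = "a" * i
--         y = "a"
--         z = "a" * (n - i) + "b" * n + "c" * n
--         pumped = x + y * 2 + z
--         count_a = pumped.count("a")
--         count_b = pumped.count("b")
--         count_c = pumped.count("c")
--         if count_a != count_b or count_b != count_c:
--             return True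
--     return False
-- ===== SOURCE B (Python) =====
-- def pump_lemma_check_L3(n):
--     # L3={a^n b^n c^n | n>0}: pumping y="a" always unbalances the counts,
--     # so the first loop iteration (i=1) already returns True whenever n > 0.
--     return n > 0
-- ===== Notes on version B (the rewrite author's own statement) =====
-- stated objective: faster
-- what changed: Replaced the O(n^2) string-building loop by the closed form n > 0: every pumped string has n+2 a's vs n b's, so the very first iteration returns True.
import Mathlib
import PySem

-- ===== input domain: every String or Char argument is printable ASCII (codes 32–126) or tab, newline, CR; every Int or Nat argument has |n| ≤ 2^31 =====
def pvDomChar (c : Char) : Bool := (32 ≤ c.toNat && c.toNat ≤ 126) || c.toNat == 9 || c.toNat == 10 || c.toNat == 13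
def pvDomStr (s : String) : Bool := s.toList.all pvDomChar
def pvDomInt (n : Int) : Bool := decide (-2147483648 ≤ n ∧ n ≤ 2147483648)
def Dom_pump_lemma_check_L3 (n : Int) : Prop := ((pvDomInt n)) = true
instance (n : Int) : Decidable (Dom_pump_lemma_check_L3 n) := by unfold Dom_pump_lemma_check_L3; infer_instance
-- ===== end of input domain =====

-- B replaces A's string-building loop by the closed form n > 0 (the first iteration always returns True).

-- ===== PORT A =====
-- strings are ported as List Char; "a"*k is PySem.List.pyRepeat ['a'] k and s.count("a")
-- is List.count 'a' (exact here: the needle is a single character)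
def pumpLoopA (n : Int) : List Int → Bool
  | [] => false
  | i :: rest =>
    let x := PySem.List.pyRepeat ['a'] i
    let y := ['a']
    let z := PySem.List.pyRepeat ['a'] (n - i) ++ PySem.List.pyRepeat ['b'] n
               ++ PySem.List.pyRepeat ['c'] n
    let pumped := x ++ PySem.List.pyRepeat y 2 ++ z
    let count_a : Int := pumped.count 'a'
    let count_b : Int := pumped.count 'b'
    let count_c : Int := pumped.count 'c'
    if count_a ≠ count_b ∨ count_b ≠ count_c then true else pumpLoopA n rest

def pump_lemma_check_L3 (n : Int) : Bool :=
  let _w := PySem.List.pyRepeat ['a'] n ++ PySem.List.pyRepeat ['b'] n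
              ++ PySem.List.pyRepeat ['c'] n
  pumpLoopA n (PySem.List.pyRange 1 (n + 1) 1)

-- ===== PORT B =====
def pump_lemma_check_L3_alt (n : Int) : Bool := decide (n > 0)

-- ===== PRECONDITION & SPEC =====
def Spec_pump_lemma_check_L3 (n : Int) (out : Bool) : Prop := out = pump_lemma_check_L3_alt n
instance (n : Int) (out : Bool) : Decidable (Spec_pump_lemma_check_L3 n out) := by unfold Spec_pump_lemma_check_L3; infer_instance

-- ===== CLAIM (what is proved, stated in full; the proofs are below) =====
def Claim_equal_pump_lemma_check_L3 : Prop := ∀ (n : Int), Dom_pump_lemma_check_L3 n → Spec_pump_lemma_check_L3 n (pump_lemma_check_L3 n)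

-- ===== LEMMAS AND PROOFS =====

-- the first loop body (i = 1, reached exactly when n ≥ 1) returns True: the pumped
-- string has (n - 1) + 3 a's but only n b's
theorem pumpLoopA_cons_true (n : Int) (hn : 1 ≤ n) (rest : List Int) :
    pumpLoopA n (1 :: rest) = true := by
  simp [pumpLoopA, PySem.List.pyRepeat_singleton, List.count_append, List.count_replicate]
  left
  omega

theorem pyRange_empty_of_le (a b : Int) (h : b ≤ a) :
    PySem.List.pyRange a b 1 = [] := by
  rw [PySem.List.pyRange_one]
  have : (b - a).toNat = 0 := by omega
  simp [this]

-- ===== VERDICT (by name: the statement is the Claim_ definition above) =====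
theorem pump_lemma_check_L3_spec : Claim_equal_pump_lemma_check_L3 := by
  intro n _
  unfold Spec_pump_lemma_check_L3 pump_lemma_check_L3 pump_lemma_check_L3_alt
  by_cases hn : 1 ≤ n
  · rw [PySem.List.pyRange_one_cons (by omega)]
    rw [pumpLoopA_cons_true n hn]
    simp
    omega
  · rw [pyRange_empty_of_le 1 (n + 1) (by omega)]
    simp [pumpLoopA]
    omega
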